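-- pv_equiv track=rewrite | github.com/Roberh18/Final-Project_GTM | Final-Iteration_Project-GTM_Dataset-Generated_Hex-Game_v1.2.py | calculate_edge_piece_count
-- ===== SOURCE A (Python) =====
-- def calculate_edge_piece_count(board, board_size=7):
--     edge_indices = set()
--
--     # Top and bottom edges
--     edge_indices.update(range(board_size))  # Top
--     edge_indices.update(range(board_size * (board_size - 1), board_size**2))  # Bottom
--
--     # Left and right edges
--     for row in range(board_size):
--         edge_indices.add(row * board_size)  # Left
--         edge_indices.add(row * board_size + (board_size - 1))  # Right
--
--     red_count = sum(1 for idx in edge_indices if board[idx] == 'X')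
--     blue_count = sum(1 for idx in edge_indices if board[idx] == 'O')
--     if red_count > blue_count:
--         return 'D'  # Red controls
--     else:
--         return 'C'  # Blue controls
-- ===== SOURCE B (Python) =====
-- def calculate_edge_piece_count(board, board_size=7):
--     red_count = 0
--     blue_count = 0
--     for r in range(board_size):
--         for c in range(board_size):
--             if r == 0 or r == board_size - 1 or c == 0 or c == board_size - 1:
--                 cell = board[r * board_size + c]
--                 if cell == 'X':
--                     red_count += 1
--                 elif cell == 'O':
--                     blue_count += 1
--     return 'D' if red_count > blue_count else 'C'
-- ===== Notes on version B (the rewrite author's own statement) =====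
-- stated objective: alternative
-- what changed: Replaced the built-then-queried edge-index set and its two counting generator passes with a single positional scan over the (r,c) grid that classifies each cell as edge by its coordinates and tallies both colors in one pass.
import Mathlib
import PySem

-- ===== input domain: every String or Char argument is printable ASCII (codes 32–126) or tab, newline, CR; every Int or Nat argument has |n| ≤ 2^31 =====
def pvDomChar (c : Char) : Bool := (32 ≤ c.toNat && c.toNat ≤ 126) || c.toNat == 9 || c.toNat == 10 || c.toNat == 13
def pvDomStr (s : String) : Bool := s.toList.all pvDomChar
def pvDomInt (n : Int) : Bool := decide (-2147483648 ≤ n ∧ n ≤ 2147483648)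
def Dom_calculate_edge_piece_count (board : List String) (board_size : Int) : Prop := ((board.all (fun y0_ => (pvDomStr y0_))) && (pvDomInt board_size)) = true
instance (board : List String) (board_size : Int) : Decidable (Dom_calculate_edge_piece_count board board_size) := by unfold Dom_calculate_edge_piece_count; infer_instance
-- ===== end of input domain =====

-- ===== PORT A =====
-- B replaces A's edge-index set with a single positional scan over the grid (alternative decomposition, same cost).
def calculate_edge_piece_count (board : List String) (board_size : Int) : String :=
  let s0 : PySem.Set Int := PySem.Set.empty
  let s1 : PySem.Set Int := PySem.Set.update s0 (PySem.List.pyRange 0 board_size 1)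
  let s2 : PySem.Set Int :=
    PySem.Set.update s1 (PySem.List.pyRange (board_size * (board_size - 1)) (board_size ^ 2) 1)
  let s3 : PySem.Set Int :=
    (PySem.List.pyRange 0 board_size 1).foldl
      (fun s row =>
        PySem.Set.add (PySem.Set.add s (row * board_size)) (row * board_size + (board_size - 1))) s2
  let red_count : Int :=
    (s3.map (fun idx => if PySem.List.pyGet? board idx = some "X" then (1 : Int) else 0)).sum
  let blue_count : Int :=
    (s3.map (fun idx => if PySem.List.pyGet? board idx = some "O" then (1 : Int) else 0)).sum
  if red_count > blue_count then "D" else "C"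

-- ===== PORT B =====
def calculate_edge_piece_count_alt (board : List String) (board_size : Int) : String :=
  let counts : Int × Int :=
    (PySem.List.pyRange 0 board_size 1).foldl
      (fun acc r =>
        (PySem.List.pyRange 0 board_size 1).foldl
          (fun acc2 c =>
            if r = 0 ∨ r = board_size - 1 ∨ c = 0 ∨ c = board_size - 1 then
              let cell := PySem.List.pyGet? board (r * board_size + c)
              if cell = some "X" then (acc2.1 + 1, acc2.2)
              else if cell = some "O" then (acc2.1, acc2.2 + 1)
              else acc2
            else acc2) acc) ((0 : Int), (0 : Int))
  if counts.1 > counts.2 then "D" else "C"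

-- ===== PRECONDITION & SPEC =====
-- Pre_ excludes exactly the inputs where Python A raises IndexError: a positive board_size with a
-- board shorter than board_size^2 (A reads every index up to board_size^2 - 1).
def Pre_calculate_edge_piece_count (board : List String) (board_size : Int) : Prop :=
  board_size ≤ 0 ∨ board_size * board_size ≤ (board.length : Int)
instance (board : List String) (board_size : Int) :
    Decidable (Pre_calculate_edge_piece_count board board_size) := by
  unfold Pre_calculate_edge_piece_count; infer_instance
def pvWitness_calculate_edge_piece_count : List String × Int := (["X", "O", "X", "X"], 2)
def Spec_calculate_edge_piece_count (board : List String) (board_size : Int) (out : String) : Prop := out = calculate_edge_piece_count_alt board board_size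
instance (board : List String) (board_size : Int) (out : String) : Decidable (Spec_calculate_edge_piece_count board board_size out) := by unfold Spec_calculate_edge_piece_count; infer_instance

-- ===== CLAIM (what is proved, stated in full; the proofs are below) =====
def Claim_equal_calculate_edge_piece_count : Prop := ∀ (board : List String) (board_size : Int), Dom_calculate_edge_piece_count board board_size → Pre_calculate_edge_piece_count board board_size → Spec_calculate_edge_piece_count board board_size (calculate_edge_piece_count board board_size)

-- ===== LEMMAS AND PROOFS =====

-- indicator count of a color over a list of indices
def pvCnt (board : List String) (t : String) (l : List Int) : Int :=
  (l.map (fun idx => if PySem.List.pyGet? board idx = some t then (1 : Int) else 0)).sum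

-- the list of edge indices in B's scan order
def pvEdgeList (n : Int) : List Int :=
  (PySem.List.pyRange 0 n 1).flatMap (fun r =>
    (PySem.List.pyRange 0 n 1).filterMap (fun c =>
      if r = 0 ∨ r = n - 1 ∨ c = 0 ∨ c = n - 1 then some (r * n + c) else none))

theorem pvCnt_append (board : List String) (t : String) (l1 l2 : List Int) :
    pvCnt board t (l1 ++ l2) = pvCnt board t l1 + pvCnt board t l2 := by
  simp [pvCnt]

theorem pvCnt_perm (board : List String) (t : String) {l1 l2 : List Int} (h : List.Perm l1 l2) :
    pvCnt board t l1 = pvCnt board t l2 := by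
  exact ((h.map _).sum_eq)

-- B's inner loop: tallies the filterMapped cells of one row
theorem pvInner (board : List String) (n r : Int) (cs : List Int) (acc : Int × Int) :
    cs.foldl
      (fun acc2 c =>
        if r = 0 ∨ r = n - 1 ∨ c = 0 ∨ c = n - 1 then
          let cell := PySem.List.pyGet? board (r * n + c)
          if cell = some "X" then (acc2.1 + 1, acc2.2)
          else if cell = some "O" then (acc2.1, acc2.2 + 1)
          else acc2
        else acc2) acc
    = (acc.1 + pvCnt board "X" (cs.filterMap (fun c =>
          if r = 0 ∨ r = n - 1 ∨ c = 0 ∨ c = n - 1 then some (r * n + c) else none)),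
       acc.2 + pvCnt board "O" (cs.filterMap (fun c =>
          if r = 0 ∨ r = n - 1 ∨ c = 0 ∨ c = n - 1 then some (r * n + c) else none))) := by
  induction cs generalizing acc with
  | nil => simp [pvCnt]
  | cons c cs ih =>
    simp only [List.foldl_cons, List.filterMap_cons]
    by_cases hE : r = 0 ∨ r = n - 1 ∨ c = 0 ∨ c = n - 1
    · simp only [if_pos hE]
      by_cases hX : PySem.List.pyGet? board (r * n + c) = some "X"
      · simp [hX, ih, pvCnt] <;> omega
      · by_cases hO : PySem.List.pyGet? board (r * n + c) = some "O"
        · simp [hO, ih, pvCnt] <;> omega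
        · simp [hX, hO, ih, pvCnt]
    · simp [ih, hE]

-- B's outer loop
theorem pvOuter (board : List String) (n : Int) (rs : List Int) (acc : Int × Int) :
    rs.foldl
      (fun acc r =>
        (PySem.List.pyRange 0 n 1).foldl
          (fun acc2 c =>
            if r = 0 ∨ r = n - 1 ∨ c = 0 ∨ c = n - 1 then
              let cell := PySem.List.pyGet? board (r * n + c)
              if cell = some "X" then (acc2.1 + 1, acc2.2)
              else if cell = some "O" then (acc2.1, acc2.2 + 1)
              else acc2
            else acc2) acc) acc
    = (acc.1 + pvCnt board "X" (rs.flatMap (fun r => (PySem.List.pyRange 0 n 1).filterMap (fun c =>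
          if r = 0 ∨ r = n - 1 ∨ c = 0 ∨ c = n - 1 then some (r * n + c) else none))),
       acc.2 + pvCnt board "O" (rs.flatMap (fun r => (PySem.List.pyRange 0 n 1).filterMap (fun c =>
          if r = 0 ∨ r = n - 1 ∨ c = 0 ∨ c = n - 1 then some (r * n + c) else none)))) := by
  induction rs generalizing acc with
  | nil => simp [pvCnt]
  | cons r rs ih =>
    simp only [List.foldl_cons, List.flatMap_cons]
    rw [pvInner, ih]
    simp [pvCnt_append] <;> omega

-- membership in A's row loop (two adds per row)
theorem pvMemFoldlAdd2 (l : List Int) (s : PySem.Set Int) (f g : Int → Int) (y : Int) :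
    y ∈ l.foldl (fun s r => PySem.Set.add (PySem.Set.add s (f r)) (g r)) s ↔
      y ∈ s ∨ ∃ r ∈ l, y = f r ∨ y = g r := by
  induction l generalizing s with
  | nil => simp
  | cons r l ih =>
    simp only [List.foldl_cons, ih, PySem.Set.mem_add, List.mem_cons]
    constructor
    · rintro (((h | h) | h) | ⟨r', hr', h⟩)
      · exact Or.inl h
      · exact Or.inr ⟨r, Or.inl rfl, Or.inl h⟩
      · exact Or.inr ⟨r, Or.inl rfl, Or.inr h⟩
      · exact Or.inr ⟨r', Or.inr hr', h⟩
    · rintro (h | ⟨r', hr' | hr', h⟩)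
      · exact Or.inl (Or.inl (Or.inl h))
      · subst hr'; rcases h with h | h
        · exact Or.inl (Or.inl (Or.inr h))
        · exact Or.inl (Or.inr h)
      · exact Or.inr ⟨r', hr', h⟩

theorem pvNodupFoldlAdd2 (l : List Int) (s : PySem.Set Int) (f g : Int → Int) (hs : s.Nodup) :
    (l.foldl (fun s r => PySem.Set.add (PySem.Set.add s (f r)) (g r)) s).Nodup := by
  induction l generalizing s with
  | nil => exact hs
  | cons r l ih => exact ih _ (PySem.Set.nodup_add _ _ (PySem.Set.nodup_add _ _ hs))

-- the abstract edge-index predicate both sides meet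
theorem pvMemEdgeList (n x : Int) :
    x ∈ pvEdgeList n ↔
      (0 ≤ x ∧ x < n) ∨ (n * (n - 1) ≤ x ∧ x < n ^ 2) ∨
        ∃ r, (0 ≤ r ∧ r < n) ∧ (x = r * n ∨ x = r * n + (n - 1)) := by
  have hkey : n * (n - 1) + n = n ^ 2 := by ring
  simp only [pvEdgeList, List.mem_flatMap, List.mem_filterMap, PySem.List.mem_pyRange_one]
  constructor
  · rintro ⟨r, ⟨hr0, hrn⟩, c, ⟨hc0, hcn⟩, hif⟩
    split_ifs at hif with hE
    · have hx : x = r * n + c := (Option.some_inj.mp hif).symm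
      subst hx
      rcases hE with h0 | h1 | h2 | h3
      · subst h0; left; constructor <;> omega
      · subst h1; right; left
        constructor
        · nlinarith
        · nlinarith
      · subst h2; right; right; exact ⟨r, ⟨hr0, hrn⟩, Or.inl (by ring)⟩
      · subst h3; right; right; exact ⟨r, ⟨hr0, hrn⟩, Or.inr rfl⟩
  · rintro (⟨h0, h1⟩ | ⟨h0, h1⟩ | ⟨r, ⟨hr0, hrn⟩, h | h⟩)
    · refine ⟨0, ⟨le_refl 0, by omega⟩, x, ⟨h0, h1⟩, ?_⟩
      rw [if_pos (Or.inl rfl)]; simp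
    · have hn : 0 < n := by nlinarith
      refine ⟨n - 1, ⟨by omega, by omega⟩, x - n * (n - 1), ⟨by omega, by nlinarith⟩, ?_⟩
      rw [if_pos (Or.inr (Or.inl rfl))]
      congr 1; ring
    · refine ⟨r, ⟨hr0, hrn⟩, 0, ⟨le_refl 0, by omega⟩, ?_⟩
      rw [if_pos (Or.inr (Or.inr (Or.inl rfl)))]
      simp [h]
    · refine ⟨r, ⟨hr0, hrn⟩, n - 1, ⟨by omega, by omega⟩, ?_⟩
      rw [if_pos (Or.inr (Or.inr (Or.inr rfl)))]
      simp [h]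

theorem pvNodupEdgeList (n : Int) : (pvEdgeList n).Nodup := by
  rw [pvEdgeList, List.nodup_flatMap]
  constructor
  · intro r _
    refine (PySem.List.nodup_pyRange_one 0 n).filterMap ?_
    intro a a' b hb hb'
    split_ifs at hb hb' <;> simp_all
    omega
  · refine (PySem.List.pairwise_lt_pyRange_one 0 n).imp ?_
    intro r r' hlt
    simp only [List.disjoint_left, List.mem_filterMap, PySem.List.mem_pyRange_one]
    rintro x ⟨c, ⟨hc0, hcn⟩, hif⟩ ⟨c', ⟨hc0', hcn'⟩, hif'⟩
    split_ifs at hif hif' <;> simp_all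
    nlinarith

-- the membership characterisation of A's set s3
theorem pvMemS3 (n x : Int) :
    x ∈ (PySem.List.pyRange 0 n 1).foldl
        (fun s row => PySem.Set.add (PySem.Set.add s (row * n)) (row * n + (n - 1)))
        (PySem.Set.update
          (PySem.Set.update (PySem.Set.empty : PySem.Set Int) (PySem.List.pyRange 0 n 1))
          (PySem.List.pyRange (n * (n - 1)) (n ^ 2) 1)) ↔ x ∈ pvEdgeList n := by
  rw [pvMemFoldlAdd2, pvMemEdgeList]
  simp only [PySem.Set.mem_update, PySem.List.mem_pyRange_one]
  rw [or_assoc]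
  simp [PySem.Set.empty]

theorem pvNodupS3 (n : Int) :
    ((PySem.List.pyRange 0 n 1).foldl
        (fun s row => PySem.Set.add (PySem.Set.add s (row * n)) (row * n + (n - 1)))
        (PySem.Set.update
          (PySem.Set.update (PySem.Set.empty : PySem.Set Int) (PySem.List.pyRange 0 n 1))
          (PySem.List.pyRange (n * (n - 1)) (n ^ 2) 1))).Nodup := by
  exact pvNodupFoldlAdd2 _ _ _ _
    (PySem.Set.nodup_update _ _ (PySem.Set.nodup_update _ _ List.nodup_nil))

-- ===== VERDICT (by name: the statement is the Claim_ definition above) =====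
theorem calculate_edge_piece_count_spec : Claim_equal_calculate_edge_piece_count := by
  intro board n _ _
  unfold Spec_calculate_edge_piece_count
  simp only [calculate_edge_piece_count, calculate_edge_piece_count_alt, pvOuter]
  have hperm :
      ((PySem.List.pyRange 0 n 1).foldl
        (fun s row => PySem.Set.add (PySem.Set.add s (row * n)) (row * n + (n - 1)))
        (PySem.Set.update
          (PySem.Set.update (PySem.Set.empty : PySem.Set Int) (PySem.List.pyRange 0 n 1))
          (PySem.List.pyRange (n * (n - 1)) (n ^ 2) 1))).Perm (pvEdgeList n) := by
    rw [List.perm_ext_iff_of_nodup (pvNodupS3 n) (pvNodupEdgeList n)]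
    exact pvMemS3 n
  have hX := pvCnt_perm board "X" hperm
  have hO := pvCnt_perm board "O" hperm
  simp only [pvCnt, pvEdgeList] at hX hO
  simp only [pvCnt, hX, hO, zero_add]
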